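-- pv_equiv track=rewrite | github.com/MiroVatov/Python-SoftUni | Python Fundamentals 2020 - 2021/04. Functions/10. Array Manipulator ver 2.py | min_odd_index
-- ===== SOURCE A (Python) =====
-- def min_odd_index(array, ar_index):
--     index_min_even_odd = []
--     min_even_odd_num = 0
--     index_pos = []
--     min_odd = [ind for ind in array if ind % 2 != 0]
--     for i in min_odd:
--         if i <= min(min_odd):
--             index_min_even_odd.append(i)
--             min_even_odd_num = i
--
--     if len(index_min_even_odd) >= 1:
--         index_pos = len(array) - array[::-1].index(min_even_odd_num) - 1
--         return f"{index_pos}"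
--     elif len(index_min_even_odd) == 0:
--         return f"No matches"
-- ===== SOURCE B (Python) =====
-- def min_odd_index(array, ar_index):
--     best = None
--     best_idx = 0
--     for i, v in enumerate(array):
--         if v % 2 != 0:
--             if best is None or v < best:
--                 best = v
--                 best_idx = i
--             elif v == best:
--                 best_idx = i
--     return f"{best_idx}" if best is not None else "No matches"
-- ===== Notes on version B (the rewrite author's own statement) =====
-- stated objective: alternative
-- what changed: Replaces A's filter-list + min() recomputed inside the loop + reversed-list .index() scan by a single forward pass with enumerate that maintains the smallest odd value seen and the index of its latest occurrence.
import Mathlib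
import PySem

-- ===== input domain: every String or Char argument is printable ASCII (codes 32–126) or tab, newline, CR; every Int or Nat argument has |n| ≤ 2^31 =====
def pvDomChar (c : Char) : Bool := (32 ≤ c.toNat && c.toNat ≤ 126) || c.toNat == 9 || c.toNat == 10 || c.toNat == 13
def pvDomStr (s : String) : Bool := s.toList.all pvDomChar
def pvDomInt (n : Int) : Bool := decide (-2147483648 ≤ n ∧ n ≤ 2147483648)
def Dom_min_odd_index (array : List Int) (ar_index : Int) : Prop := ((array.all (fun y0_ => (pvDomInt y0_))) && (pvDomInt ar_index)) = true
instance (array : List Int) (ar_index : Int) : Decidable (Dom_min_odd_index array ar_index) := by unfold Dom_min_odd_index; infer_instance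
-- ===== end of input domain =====

-- B replaces A's filter + min() recomputed per iteration + reversed-list .index scan by one
-- forward pass keeping the smallest odd value and the index of its latest occurrence.

-- ===== PORT A =====
-- literal transliteration of A; the final Python if/elif covers all cases (the lengths are
-- either ≥ 1 or = 0), so it is an if/else here; .index / min are guarded with getD, which is
-- never hit (the element searched for is present, min is only taken of a nonempty list).
def min_odd_index (array : List Int) (ar_index : Int) : String :=
  let min_odd := array.filter (fun ind => PySem.Int.mod ind 2 != 0)
  let st := min_odd.foldl
    (fun (s : List Int × Int) i =>
      if i ≤ (PySem.List.min? min_odd (fun x => x)).getD 0 then (s.1 ++ [i], i) else s)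
    ([], 0)
  if st.1.length ≥ 1 then
    PySem.Int.toStr ((array.length : Int) -
      (((PySem.List.index? ((PySem.List.slice? array none none (-1)).getD []) st.2).getD 0 : Nat) : Int) - 1)
  else
    "No matches"

-- ===== PORT B =====
-- one forward pass (Source B): state = (best smallest odd seen, index of its latest occurrence)
def min_odd_index_alt (array : List Int) (ar_index : Int) : String :=
  let st := (PySem.List.enumerate array 0).foldl
    (fun (s : Option Int × Int) p =>
      if PySem.Int.mod p.2 2 ≠ 0 then
        match s.1 with
        | none => (some p.2, p.1)
        | some b =>
          if p.2 < b then (some p.2, p.1)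
          else if p.2 = b then (some b, p.1)
          else s
      else s)
    (none, 0)
  match st.1 with
  | some _ => PySem.Int.toStr st.2
  | none => "No matches"

-- ===== PRECONDITION & SPEC =====
def Spec_min_odd_index (array : List Int) (ar_index : Int) (out : String) : Prop := out = min_odd_index_alt array ar_index
instance (array : List Int) (ar_index : Int) (out : String) : Decidable (Spec_min_odd_index array ar_index out) := by unfold Spec_min_odd_index; infer_instance

-- ===== CLAIM (what is proved, stated in full; the proofs are below) =====
def Claim_equal_min_odd_index : Prop := ∀ (array : List Int) (ar_index : Int), Dom_min_odd_index array ar_index → Spec_min_odd_index array ar_index (min_odd_index array ar_index)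

-- ===== LEMMAS AND PROOFS =====

-- reference: (minimum odd value, index of its last occurrence), or none if no odd element
def pvRef : List Int → Option (Int × Nat)
  | [] => none
  | v :: t =>
    match pvRef t with
    | none => if PySem.Int.mod v 2 ≠ 0 then some (v, 0) else none
    | some (m, j) =>
      if PySem.Int.mod v 2 ≠ 0 ∧ v < m then some (v, 0) else some (m, j + 1)

-- index of the last occurrence of m
def pvLastIdx? (m : Int) : List Int → Option Nat
  | [] => none
  | v :: t =>
    match pvLastIdx? m t with
    | some j => some (j + 1)
    | none => if v = m then some 0 else none

theorem pvOddbT {v : Int} (h : PySem.Int.mod v 2 ≠ 0) : (PySem.Int.mod v 2 != 0) = true := by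
  simpa using h

theorem pvOddbF {v : Int} (h : ¬ PySem.Int.mod v 2 ≠ 0) : (PySem.Int.mod v 2 != 0) = false := by
  simpa using h

theorem pvLastIdx?_eq_none_iff (m : Int) (l : List Int) : pvLastIdx? m l = none ↔ m ∉ l := by
  induction l with
  | nil => simp [pvLastIdx?]
  | cons v t ih =>
    simp only [pvLastIdx?]
    cases ht : pvLastIdx? m t with
    | some j =>
      have hmem : m ∈ t := by by_contra hc; rw [ih.mpr hc] at ht; cases ht
      simp [hmem]
    | none =>
      have hmt : m ∉ t := ih.mp ht
      by_cases hv : v = m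
      · subst hv; simp
      · simp only [hv, if_false, List.mem_cons]
        constructor
        · intro _ hc
          rcases hc with h1 | h2
          · exact hv h1.symm
          · exact hmt h2
        · intro _; trivial

theorem pvLastIdx?_lt_length (m : Int) (l : List Int) (j : Nat) (h : pvLastIdx? m l = some j) : j < l.length := by
  induction l generalizing j with
  | nil => simp [pvLastIdx?] at h
  | cons v t ih =>
    cases ht : pvLastIdx? m t with
    | some j' =>
      simp only [pvLastIdx?, ht, Option.some.injEq] at h
      have := ih j' ht
      simp only [List.length_cons]
      omega
    | none =>
      simp only [pvLastIdx?, ht] at h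
      by_cases hv : v = m
      · rw [if_pos hv] at h
        simp only [Option.some.injEq] at h
        simp only [List.length_cons]
        omega
      · rw [if_neg hv] at h
        cases h

theorem pvRevIndex (m : Int) (l : List Int) (j : Nat) (h : pvLastIdx? m l = some j) :
    PySem.List.index? l.reverse m = some (l.length - 1 - j) := by
  induction l generalizing j with
  | nil => simp [pvLastIdx?] at h
  | cons v t ih =>
    cases ht : pvLastIdx? m t with
    | some j' =>
      simp only [pvLastIdx?, ht, Option.some.injEq] at h
      have hmem : m ∈ t := by
        by_contra hc; rw [(pvLastIdx?_eq_none_iff m t).mpr hc] at ht; cases ht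
      have hlt := pvLastIdx?_lt_length m t j' ht
      rw [List.reverse_cons,
        PySem.List.index?_append_of_mem _ (List.mem_reverse.mpr hmem), ih j' ht]
      simp only [List.length_cons, Option.some.injEq]
      omega
    | none =>
      have hmt : m ∉ t := (pvLastIdx?_eq_none_iff m t).mp ht
      simp only [pvLastIdx?, ht] at h
      by_cases hv : v = m
      · subst hv
        rw [if_pos rfl] at h
        simp only [Option.some.injEq] at h
        rw [List.reverse_cons,
          PySem.List.index?_append_singleton_self t.reverse v (by simpa using hmt)]
        simp only [List.length_cons, List.length_reverse, Option.some.injEq]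
        omega
      · rw [if_neg hv] at h
        cases h

theorem pvFoldlMin (l : List Int) (v w : Int) : l.foldl min (min v w) = min v (l.foldl min w) := by
  induction l generalizing w with
  | nil => simp
  | cons x t ih => simp only [List.foldl_cons, min_assoc]; exact ih (min w x)

theorem pvRef_eq_none_iff (l : List Int) :
    pvRef l = none ↔ l.filter (fun ind => PySem.Int.mod ind 2 != 0) = [] := by
  induction l with
  | nil => simp [pvRef]
  | cons v t ih =>
    cases ht : pvRef t with
    | none =>
      rw [ht] at ih
      simp only [pvRef, ht, List.filter_cons]
      by_cases hv : PySem.Int.mod v 2 ≠ 0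
      · rw [if_pos hv, pvOddbT hv]
        simp
      · rw [if_neg hv, pvOddbF hv]
        simpa using ih
    | some p =>
      obtain ⟨m, j⟩ := p
      rw [ht] at ih
      simp only [pvRef, ht, List.filter_cons]
      constructor
      · intro hc
        by_cases hv : PySem.Int.mod v 2 ≠ 0 ∧ v < m
        · rw [if_pos hv] at hc; cases hc
        · rw [if_neg hv] at hc; cases hc
      · intro hc
        by_cases hv : PySem.Int.mod v 2 ≠ 0
        · rw [pvOddbT hv] at hc; simp at hc
        · rw [pvOddbF hv] at hc
          simp only [Bool.false_eq_true, if_false] at hc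
          exact absurd (ih.mpr hc) (by simp)

theorem pvRefMin (l : List Int) (m : Int) (j : Nat) (h : pvRef l = some (m, j)) :
    PySem.List.min? (l.filter (fun ind => PySem.Int.mod ind 2 != 0)) (fun x => x) = some m := by
  induction l generalizing m j with
  | nil => simp [pvRef] at h
  | cons v t ih =>
    cases ht : pvRef t with
    | none =>
      have hodds : t.filter (fun ind => PySem.Int.mod ind 2 != 0) = [] :=
        (pvRef_eq_none_iff t).mp ht
      simp only [pvRef, ht] at h
      simp only [List.filter_cons]
      by_cases hv : PySem.Int.mod v 2 ≠ 0
      · rw [if_pos hv] at h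
        simp only [Option.some.injEq, Prod.mk.injEq] at h
        rw [pvOddbT hv, if_pos rfl, hodds, PySem.List.min?_id_cons]
        simp [h.1]
      · rw [if_neg hv] at h; cases h
    | some p =>
      obtain ⟨m', j'⟩ := p
      simp only [pvRef, ht] at h
      simp only [List.filter_cons]
      have ihm := ih m' j' ht
      have hodds_ne : t.filter (fun ind => PySem.Int.mod ind 2 != 0) ≠ [] := by
        intro hc; rw [hc] at ihm; simp [PySem.List.min?] at ihm
      obtain ⟨w, r, hwr⟩ := List.exists_cons_of_ne_nil hodds_ne
      rw [hwr, PySem.List.min?_id_cons, Option.some.injEq] at ihm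
      by_cases hv : PySem.Int.mod v 2 ≠ 0
      · rw [pvOddbT hv, if_pos rfl, hwr, PySem.List.min?_id_cons, Option.some.injEq]
        have hfold : List.foldl min v (w :: r) = min v m' := by
          simp only [List.foldl_cons]
          rw [show min v w = min v w from rfl, pvFoldlMin r v w, ihm]
        rw [hfold]
        by_cases hlt : v < m'
        · rw [if_pos ⟨hv, hlt⟩] at h
          simp only [Option.some.injEq, Prod.mk.injEq] at h
          rw [← h.1]
          exact min_eq_left (le_of_lt hlt)
        · rw [if_neg (fun hc => hlt hc.2)] at h
          simp only [Option.some.injEq, Prod.mk.injEq] at h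
          rw [← h.1]
          exact min_eq_right (by omega)
      · rw [pvOddbF hv]
        simp only [Bool.false_eq_true, if_false]
        rw [if_neg (fun hc => hv hc.1)] at h
        simp only [Option.some.injEq, Prod.mk.injEq] at h
        rw [hwr, PySem.List.min?_id_cons, Option.some.injEq, ihm]
        exact h.1

theorem pvRefIdx (l : List Int) (m : Int) (j : Nat) (h : pvRef l = some (m, j)) :
    pvLastIdx? m l = some j := by
  induction l generalizing m j with
  | nil => simp [pvRef] at h
  | cons v t ih =>
    cases ht : pvRef t with
    | none =>
      have hodds : t.filter (fun ind => PySem.Int.mod ind 2 != 0) = [] :=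
        (pvRef_eq_none_iff t).mp ht
      simp only [pvRef, ht] at h
      by_cases hv : PySem.Int.mod v 2 ≠ 0
      · rw [if_pos hv] at h
        simp only [Option.some.injEq, Prod.mk.injEq] at h
        obtain ⟨hm, hj⟩ := h
        rw [← hm, ← hj]
        have hmt : v ∉ t := by
          intro hc
          have : v ∈ t.filter (fun ind => PySem.Int.mod ind 2 != 0) := by
            rw [List.mem_filter]; exact ⟨hc, pvOddbT hv⟩
          rw [hodds] at this; cases this
        simp [pvLastIdx?, (pvLastIdx?_eq_none_iff v t).mpr hmt]
      · rw [if_neg hv] at h; cases h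
    | some p =>
      obtain ⟨m', j'⟩ := p
      simp only [pvRef, ht] at h
      have hmin := pvRefMin t m' j' ht
      by_cases hv : PySem.Int.mod v 2 ≠ 0 ∧ v < m'
      · rw [if_pos hv] at h
        simp only [Option.some.injEq, Prod.mk.injEq] at h
        obtain ⟨hm, hj⟩ := h
        rw [← hm, ← hj]
        have hmt : v ∉ t := by
          intro hc
          have hmem : v ∈ t.filter (fun ind => PySem.Int.mod ind 2 != 0) := by
            rw [List.mem_filter]; exact ⟨hc, pvOddbT hv.1⟩
          have := PySem.List.min?_isMin hmin v hmem
          simp only at this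
          omega
        simp [pvLastIdx?, (pvLastIdx?_eq_none_iff v t).mpr hmt]
      · rw [if_neg hv] at h
        simp only [Option.some.injEq, Prod.mk.injEq] at h
        obtain ⟨hm, hj⟩ := h
        rw [← hm, ← hj]
        simp [pvLastIdx?, ih m' j' ht]

-- A's inner loop: with M the minimum, an append happens exactly on elements ≤ M
theorem pvFoldA (M : Int) (l : List Int) (h : ∀ i ∈ l, M ≤ i) (s : List Int × Int) :
    l.foldl (fun s i => if i ≤ M then (s.1 ++ [i], i) else s) s
      = (s.1 ++ l.filter (fun i => decide (i ≤ M)),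
         if l.filter (fun i => decide (i ≤ M)) = [] then s.2 else M) := by
  induction l generalizing s with
  | nil => simp
  | cons v t ih =>
    simp only [List.foldl_cons, List.filter_cons]
    by_cases hv : v ≤ M
    · have hvM : v = M := le_antisymm hv (h v (by simp))
      rw [if_pos hv]
      rw [ih (fun i hi => h i (by simp [hi]))]
      subst hvM
      simp
    · rw [if_neg hv]
      simp only [decide_eq_true_eq, hv, decide_false, Bool.false_eq_true, if_false]
      rw [ih (fun i hi => h i (by simp [hi]))]

-- A computes pvRef's answer
theorem pvA_eq (l : List Int) (ix : Int) :
    min_odd_index l ix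
      = match pvRef l with
        | none => "No matches"
        | some (_, j) => PySem.Int.toStr (j : Int) := by
  cases hr : pvRef l with
  | none =>
    have hodds := (pvRef_eq_none_iff l).mp hr
    simp only [min_odd_index, hodds]
    simp [PySem.List.min?]
  | some p =>
    obtain ⟨m, j⟩ := p
    have hmin := pvRefMin l m j hr
    have hlast := pvRefIdx l m j hr
    have hlt := pvLastIdx?_lt_length m l j hlast
    have hrev := pvRevIndex m l j hlast
    simp only [min_odd_index, hmin, Option.getD_some]
    have hisMin := PySem.List.min?_isMin hmin
    have hmem := PySem.List.min?_mem hmin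
    rw [pvFoldA m _ (fun i hi => hisMin i hi)]
    have hmem2 : m ∈ (l.filter (fun ind => PySem.Int.mod ind 2 != 0)).filter (fun i => decide (i ≤ m)) := by
      rw [List.mem_filter]; exact ⟨hmem, by simp⟩
    have hne : (l.filter (fun ind => PySem.Int.mod ind 2 != 0)).filter (fun i => decide (i ≤ m)) ≠ [] := by
      intro hc; rw [hc] at hmem2; cases hmem2
    rw [if_neg hne]
    have hlen : ([] ++ (l.filter (fun ind => PySem.Int.mod ind 2 != 0)).filter (fun i => decide (i ≤ m))).length ≥ 1 := by
      simp only [List.nil_append]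
      cases hcase : (l.filter (fun ind => PySem.Int.mod ind 2 != 0)).filter (fun i => decide (i ≤ m)) with
      | nil => exact absurd hcase hne
      | cons a b => simp
    rw [if_pos hlen, PySem.List.slice?_none_none_neg_one]
    simp only [Option.getD_some]
    rw [hrev]
    simp only [Option.getD_some]
    congr 1
    have : ((l.length - 1 - j : Nat) : Int) = (l.length : Int) - 1 - (j : Int) := by omega
    rw [this]; ring

-- B's loop invariant: folding over enumerate l k from a state whose best, if any, is odd
theorem pvFoldB (l : List Int) (k : Int) (s : Option Int × Int)
    (hb : ∀ b, s.1 = some b → PySem.Int.mod b 2 ≠ 0) :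
    (PySem.List.enumerate l k).foldl
      (fun (s : Option Int × Int) p =>
        if PySem.Int.mod p.2 2 ≠ 0 then
          match s.1 with
          | none => (some p.2, p.1)
          | some b =>
            if p.2 < b then (some p.2, p.1)
            else if p.2 = b then (some b, p.1)
            else s
        else s) s
      = match pvRef l, s.1 with
        | none, _ => s
        | some (m, j), none => (some m, k + (j : Int))
        | some (m, j), some b => if m ≤ b then (some m, k + (j : Int)) else s := by
  induction l generalizing k s with
  | nil => cases hs : s.1 <;> simp [pvRef, PySem.List.enumerate, hs]
  | cons v t ih =>
    rw [PySem.List.enumerate_cons]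
    simp only [List.foldl_cons, pvRef]
    by_cases hv : PySem.Int.mod v 2 ≠ 0
    · simp only [if_pos hv]
      cases hs : s.1 with
      | none =>
        simp only [hs]
        rw [ih (k + 1) (some v, k) (fun b' hb' => by cases hb'; exact hv)]
        cases ht : pvRef t with
        | none => dsimp only; simp
        | some p =>
          obtain ⟨m, j⟩ := p
          dsimp only
          by_cases hlt : v < m
          · rw [if_pos (show PySem.Int.mod v 2 ≠ 0 ∧ v < m from ⟨hv, hlt⟩)]
            try dsimp only
            rw [if_neg (show ¬ m ≤ v by omega)]
            simp
          · rw [if_neg (show ¬ (PySem.Int.mod v 2 ≠ 0 ∧ v < m) from fun hc => hlt hc.2)]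
            try dsimp only
            rw [if_pos (show m ≤ v by omega)]
            simp only [Prod.mk.injEq]
            exact ⟨by trivial, by push_cast; ring⟩
      | some b =>
        have hbodd := hb b hs
        simp only [hs]
        by_cases hvb : v < b
        · rw [if_pos hvb]
          rw [ih (k + 1) (some v, k) (fun b' hb' => by cases hb'; exact hv)]
          cases ht : pvRef t with
          | none =>
            dsimp only
            rw [if_pos (le_of_lt hvb)]
            simp
          | some p =>
            obtain ⟨m, j⟩ := p
            dsimp only
            by_cases hlt : v < m
            · rw [if_pos (show PySem.Int.mod v 2 ≠ 0 ∧ v < m from ⟨hv, hlt⟩)]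
              try dsimp only
              rw [if_neg (show ¬ m ≤ v by omega), if_pos (le_of_lt hvb)]
              simp
            · rw [if_neg (show ¬ (PySem.Int.mod v 2 ≠ 0 ∧ v < m) from fun hc => hlt hc.2)]
              try dsimp only
              rw [if_pos (show m ≤ v by omega), if_pos (show m ≤ b by omega)]
              simp only [Prod.mk.injEq]
              exact ⟨by trivial, by push_cast; ring⟩
        · rw [if_neg hvb]
          by_cases hvb2 : v = b
          · rw [if_pos hvb2]
            subst hvb2
            rw [ih (k + 1) (some v, k) (fun b' hb' => by cases hb'; exact hv)]
            cases ht : pvRef t with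
            | none =>
              dsimp only
              rw [if_pos (le_refl v)]
              simp
            | some p =>
              obtain ⟨m, j⟩ := p
              dsimp only
              by_cases hlt : v < m
              · rw [if_pos (show PySem.Int.mod v 2 ≠ 0 ∧ v < m from ⟨hv, hlt⟩)]
                try dsimp only
                rw [if_neg (show ¬ m ≤ v by omega), if_pos (le_refl v)]
                try simp
              · rw [if_neg (show ¬ (PySem.Int.mod v 2 ≠ 0 ∧ v < m) from fun hc => hlt hc.2)]
                try dsimp only
                rw [if_pos (show m ≤ v by omega), if_pos (show m ≤ v by omega)]
                simp only [Prod.mk.injEq]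
                exact ⟨by trivial, by push_cast; ring⟩
          · rw [if_neg hvb2]
            rw [ih (k + 1) s hb]
            cases ht : pvRef t with
            | none =>
              try dsimp only
              try simp only [hs]
              try dsimp only
              rw [if_neg (show ¬ v ≤ b by omega)]
            | some p =>
              obtain ⟨m, j⟩ := p
              try dsimp only
              try simp only [hs]
              try dsimp only
              by_cases hlt : v < m
              · rw [if_pos (show PySem.Int.mod v 2 ≠ 0 ∧ v < m from ⟨hv, hlt⟩)]
                try dsimp only
                try simp only [hs]
                try dsimp only
                rw [if_neg (show ¬ v ≤ b by omega), if_neg (show ¬ m ≤ b by omega)]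
              · rw [if_neg (show ¬ (PySem.Int.mod v 2 ≠ 0 ∧ v < m) from fun hc => hlt hc.2)]
                try dsimp only
                try simp only [hs]
                try dsimp only
                by_cases hmb : m ≤ b
                · rw [if_pos hmb, if_pos hmb]
                  simp only [Prod.mk.injEq]
                  exact ⟨by trivial, by push_cast; ring⟩
                · rw [if_neg hmb, if_neg hmb]
    · simp only [if_neg hv]
      rw [ih (k + 1) s hb]
      cases ht : pvRef t with
      | none => rfl
      | some p =>
        obtain ⟨m, j⟩ := p
        dsimp only
        rw [if_neg (show ¬ (PySem.Int.mod v 2 ≠ 0 ∧ v < m) from fun hc => hv hc.1)]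
        try dsimp only
        cases hs : s.1 with
        | none =>
          simp only [hs]
          try dsimp only
          simp only [Prod.mk.injEq]
          exact ⟨by trivial, by push_cast; ring⟩
        | some b =>
          simp only [hs]
          try dsimp only
          by_cases hmb : m ≤ b
          · rw [if_pos hmb, if_pos hmb]
            simp only [Prod.mk.injEq]
            exact ⟨by trivial, by push_cast; ring⟩
          · rw [if_neg hmb, if_neg hmb]

theorem pvB_eq (l : List Int) (ix : Int) :
    min_odd_index_alt l ix
      = match pvRef l with
        | none => "No matches"
        | some (_, j) => PySem.Int.toStr (j : Int) := by
  simp only [min_odd_index_alt]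
  rw [pvFoldB l 0 (none, 0) (by intro b hb; cases hb)]
  cases hr : pvRef l with
  | none => simp
  | some p => obtain ⟨m, j⟩ := p; simp

-- ===== VERDICT (by name: the statement is the Claim_ definition above) =====
theorem min_odd_index_spec : Claim_equal_min_odd_index := by
  intro array ar_index _
  unfold Spec_min_odd_index
  rw [pvA_eq array ar_index, pvB_eq array ar_index]
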